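-- pv_equiv track=rewrite | github.com/sonalexle/vlm-viz | vlm_viz/utils/model_utils.py | get_model_class
-- ===== SOURCE A (Python) =====
-- def get_model_class(model_checkpoint):
--     class_to_ckpt = {
--         "llama": ["lmsys/vicuna-7b-v1.5", "llava-hf/llava-1.5-7b-hf"],
--         "llama3": ["meta-llama/Meta-Llama-3-8B-Instruct", "meta-llama/Meta-Llama-3-8B"],
--         "mistral": [
--             "mistralai/Mistral-7B-Instruct-v0.2", "HuggingFaceM4/idefics2-8b", "HuggingFaceM4/idefics2-8b-base",
--             "llava-hf/llava-v1.6-mistral-7b-hf", "llava-hf/bakLlava-v1-hf"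
--         ],
--         "gemma": ["google/gemma-1.1-2b-it", "google/paligemma-3b-pt-448"],
--     }
--     for class_name, ckpts in class_to_ckpt.items():
--         if any([ckpt == model_checkpoint for ckpt in ckpts]):
--             return class_name
-- ===== SOURCE B (Python) =====
-- CKPT_TO_CLASS = {
--     "lmsys/vicuna-7b-v1.5": "llama",
--     "llava-hf/llava-1.5-7b-hf": "llama",
--     "meta-llama/Meta-Llama-3-8B-Instruct": "llama3",
--     "meta-llama/Meta-Llama-3-8B": "llama3",
--     "mistralai/Mistral-7B-Instruct-v0.2": "mistral",
--     "HuggingFaceM4/idefics2-8b": "mistral",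
--     "HuggingFaceM4/idefics2-8b-base": "mistral",
--     "llava-hf/llava-v1.6-mistral-7b-hf": "mistral",
--     "llava-hf/bakLlava-v1-hf": "mistral",
--     "google/gemma-1.1-2b-it": "gemma",
--     "google/paligemma-3b-pt-448": "gemma",
-- }
--
-- def get_model_class(model_checkpoint):
--     return CKPT_TO_CLASS.get(model_checkpoint)
-- ===== Notes on version B (the rewrite author's own statement) =====
-- stated objective: idiomatic
-- what changed: Replaced the nested loop over class->checkpoint groups with an any-scan by a flat inverted checkpoint->class dictionary literal and a single .get lookup.
import Mathlib
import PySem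

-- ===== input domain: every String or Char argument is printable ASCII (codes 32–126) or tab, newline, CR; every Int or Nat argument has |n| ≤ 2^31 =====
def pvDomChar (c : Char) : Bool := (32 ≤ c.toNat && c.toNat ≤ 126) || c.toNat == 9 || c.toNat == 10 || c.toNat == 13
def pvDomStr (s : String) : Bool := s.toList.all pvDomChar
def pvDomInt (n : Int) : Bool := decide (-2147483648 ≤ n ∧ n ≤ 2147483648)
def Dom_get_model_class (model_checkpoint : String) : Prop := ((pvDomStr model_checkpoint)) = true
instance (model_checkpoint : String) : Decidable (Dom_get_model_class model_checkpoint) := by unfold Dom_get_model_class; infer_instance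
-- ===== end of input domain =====

-- B replaces A's nested group-scan by a flat inverted checkpoint->class dictionary and one lookup (idiomatic).

-- ===== PORT A =====
-- the dict literal of A, as an association list in insertion order
def gmcClassToCkpt : List (String × List String) :=
  [("llama", ["lmsys/vicuna-7b-v1.5", "llava-hf/llava-1.5-7b-hf"]),
   ("llama3", ["meta-llama/Meta-Llama-3-8B-Instruct", "meta-llama/Meta-Llama-3-8B"]),
   ("mistral", ["mistralai/Mistral-7B-Instruct-v0.2", "HuggingFaceM4/idefics2-8b",
                "HuggingFaceM4/idefics2-8b-base", "llava-hf/llava-v1.6-mistral-7b-hf",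
                "llava-hf/bakLlava-v1-hf"]),
   ("gemma", ["google/gemma-1.1-2b-it", "google/paligemma-3b-pt-448"])]

-- the 'for class_name, ckpts in …: if any(...): return class_name' loop
def gmcLoop (model_checkpoint : String) : List (String × List String) → Option String
  | [] => none
  | (class_name, ckpts) :: rest =>
      if ckpts.any (fun ckpt => ckpt == model_checkpoint) then some class_name
      else gmcLoop model_checkpoint rest

def get_model_class (model_checkpoint : String) : Option String :=
  gmcLoop model_checkpoint gmcClassToCkpt

-- ===== PORT B =====
-- flat inverted dict literal (PySem.Dict = assoc list, first match)
def gmcCkptToClass : PySem.Dict String String :=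
  PySem.Dict.mk
  [("lmsys/vicuna-7b-v1.5", "llama"),
   ("llava-hf/llava-1.5-7b-hf", "llama"),
   ("meta-llama/Meta-Llama-3-8B-Instruct", "llama3"),
   ("meta-llama/Meta-Llama-3-8B", "llama3"),
   ("mistralai/Mistral-7B-Instruct-v0.2", "mistral"),
   ("HuggingFaceM4/idefics2-8b", "mistral"),
   ("HuggingFaceM4/idefics2-8b-base", "mistral"),
   ("llava-hf/llava-v1.6-mistral-7b-hf", "mistral"),
   ("llava-hf/bakLlava-v1-hf", "mistral"),
   ("google/gemma-1.1-2b-it", "gemma"),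
   ("google/paligemma-3b-pt-448", "gemma")]

def get_model_class_alt (model_checkpoint : String) : Option String :=
  PySem.Dict.get? gmcCkptToClass model_checkpoint

-- ===== PRECONDITION & SPEC =====
def Spec_get_model_class (model_checkpoint : String) (out : Option String) : Prop := out = get_model_class_alt model_checkpoint
instance (model_checkpoint : String) (out : Option String) : Decidable (Spec_get_model_class model_checkpoint out) := by unfold Spec_get_model_class; infer_instance

-- ===== CLAIM (what is proved, stated in full; the proofs are below) =====
def Claim_equal_get_model_class : Prop := ∀ (model_checkpoint : String), Dom_get_model_class model_checkpoint → Spec_get_model_class model_checkpoint (get_model_class model_checkpoint)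

-- ===== LEMMAS AND PROOFS =====

-- ===== VERDICT (by name: the statement is the Claim_ definition above) =====
set_option maxHeartbeats 1600000 in
theorem get_model_class_spec : Claim_equal_get_model_class := by
  intro m _
  unfold Spec_get_model_class get_model_class get_model_class_alt
  simp only [gmcClassToCkpt, gmcCkptToClass, gmcLoop, List.any]
  split_ifs <;> simp_all [PySem.Dict.get?] <;> aesop
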